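-- pv_equiv track=rewrite | github.com/dementati/aoc2016-py | days/day7/__init__.py | parse
-- ===== SOURCE A (Python) =====
-- def parse(line: str) -> tuple[list[str], list[str]]:
--     """
--     >>> parse("jgltdnjfjsbrffzwbv[nclpjchuobdjfrpavcq]sbzanvbimpahadkk[yyoasqmddrzunoyyk]knfdltzlirrbypa")
--     (['jgltdnjfjsbrffzwbv', 'sbzanvbimpahadkk', 'knfdltzlirrbypa'], ['nclpjchuobdjfrpavcq', 'yyoasqmddrzunoyyk'])
--     """
--     outside = []
--     inside = []
--     current = ""
--     for c in line:
--         if c == "[":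
--             outside.append(current)
--             current = ""
--         elif c == "]":
--             inside.append(current)
--             current = ""
--         else:
--             current += c
--
--     outside.append(current)
--
--     return outside, inside
-- ===== SOURCE B (Python) =====
-- def _tokenize(line):
--     # split line into (segment, bracket) pairs plus the trailing segment
--     tokens = []
--     buf = ""
--     for c in line:
--         if c in "[]":
--             tokens.append((buf, c))
--             buf = ""
--         else:
--             buf += c
--     return tokens, buf
--
--
-- def parse(line: str) -> tuple[list[str], list[str]]:
--     tokens, last = _tokenize(line)
--     outside = [s for s, d in tokens if d == "["] + [last]
--     inside = [s for s, d in tokens if d == "]"]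
--     return outside, inside
-- ===== Notes on version B (the rewrite author's own statement) =====
-- stated objective: alternative
-- what changed: B tokenizes the line once into (segment, bracket) pairs plus a trailing segment, then builds outside/inside by filtering the pairs on which bracket follows each segment, instead of A's single state machine that routes a running buffer into the two lists as it scans.
import Mathlib
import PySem

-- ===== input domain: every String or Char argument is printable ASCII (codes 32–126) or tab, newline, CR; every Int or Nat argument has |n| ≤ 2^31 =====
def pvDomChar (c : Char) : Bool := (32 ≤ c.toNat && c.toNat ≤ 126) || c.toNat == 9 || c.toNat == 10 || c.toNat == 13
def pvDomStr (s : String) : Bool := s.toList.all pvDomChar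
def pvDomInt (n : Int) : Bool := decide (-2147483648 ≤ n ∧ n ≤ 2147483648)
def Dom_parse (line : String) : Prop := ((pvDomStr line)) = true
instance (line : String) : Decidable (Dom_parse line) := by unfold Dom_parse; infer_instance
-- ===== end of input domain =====

-- B tokenizes once into (segment, bracket) pairs and classifies them afterwards; A is a one-pass state machine. Alternative decomposition, same cost.

-- ===== PORT A =====
-- A's loop: route the running buffer into outside/inside when a bracket is met.
def parseLoop (cs : List Char) (outside inside : List String) (current : String) :
    List String × List String :=
  match cs with
  | [] => (outside ++ [current], inside)
  | c :: rest =>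
    if c = '[' then parseLoop rest (outside ++ [current]) inside ""
    else if c = ']' then parseLoop rest outside (inside ++ [current]) ""
    else parseLoop rest outside inside (current.push c)

def parse (line : String) : List String × List String :=
  parseLoop line.toList [] [] ""

-- ===== PORT B =====
-- B's tokenizer: (segment, bracket) pairs plus the trailing segment.
def tokenizeB (cs : List Char) (tokens : List (String × Char)) (buf : String) :
    List (String × Char) × String :=
  match cs with
  | [] => (tokens, buf)
  | c :: rest =>
    if c = '[' ∨ c = ']' then tokenizeB rest (tokens ++ [(buf, c)]) ""
    else tokenizeB rest tokens (buf.push c)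

def parse_alt (line : String) : List String × List String :=
  let t := tokenizeB line.toList [] ""
  ((t.1.filter (fun p => p.2 = '[')).map Prod.fst ++ [t.2],
   (t.1.filter (fun p => p.2 = ']')).map Prod.fst)

-- ===== PRECONDITION & SPEC =====
def Spec_parse (line : String) (out : List String × List String) : Prop := out = parse_alt line
instance (line : String) (out : List String × List String) : Decidable (Spec_parse line out) := by unfold Spec_parse; infer_instance

-- ===== CLAIM (what is proved, stated in full; the proofs are below) =====
def Claim_equal_parse : Prop := ∀ (line : String), Dom_parse line → Spec_parse line (parse line)

-- ===== LEMMAS AND PROOFS =====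

-- tokenizeB's token accumulator is a prefix that just gets carried along
theorem tokenizeB_acc' (cs : List Char) (tk : List (String × Char)) (buf : String) :
    tokenizeB cs tk buf = (tk ++ (tokenizeB cs [] buf).1, (tokenizeB cs [] buf).2) := by
  induction cs generalizing tk buf with
  | nil => simp [tokenizeB]
  | cons c rest ih =>
    by_cases h : c = '[' ∨ c = ']'
    · simp only [tokenizeB, if_pos h, List.nil_append]
      rw [ih (tk ++ [(buf, c)]), ih [(buf, c)]]
      simp
    · simp only [tokenizeB, if_neg h]
      exact ih tk (buf.push c)

-- main invariant: A's loop equals B's tokenize-then-classify with the accumulators prepended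
theorem parseLoop_eq (cs : List Char) (o i : List String) (cur : String) :
    parseLoop cs o i cur =
      (o ++ ((tokenizeB cs [] cur).1.filter (fun p => p.2 = '[')).map Prod.fst
         ++ [(tokenizeB cs [] cur).2],
       i ++ ((tokenizeB cs [] cur).1.filter (fun p => p.2 = ']')).map Prod.fst) := by
  induction cs generalizing o i cur with
  | nil => simp [parseLoop, tokenizeB]
  | cons c rest ih =>
    by_cases h1 : c = '['
    · have h : c = '[' ∨ c = ']' := Or.inl h1
      simp only [parseLoop, if_pos h1, tokenizeB, if_pos h, List.nil_append]
      rw [tokenizeB_acc' rest [(cur, c)] "", ih]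
      subst h1
      simp
    · by_cases h2 : c = ']'
      · have h : c = '[' ∨ c = ']' := Or.inr h2
        simp only [parseLoop, if_neg h1, if_pos h2, tokenizeB, if_pos h, List.nil_append]
        rw [tokenizeB_acc' rest [(cur, c)] "", ih]
        subst h2
        simp [h1]
      · have h : ¬ (c = '[' ∨ c = ']') := by tauto
        simp only [parseLoop, if_neg h1, if_neg h2, tokenizeB, if_neg h]
        exact ih o i (cur.push c)

-- ===== VERDICT (by name: the statement is the Claim_ definition above) =====
theorem parse_spec : Claim_equal_parse := by
  intro line _
  unfold Spec_parse parse parse_alt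
  rw [parseLoop_eq]
  simp
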